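-- pv_equiv track=rewrite | github.com/khpark97/Advent-of-Code | 2015/Day25.py | calculate
-- ===== SOURCE A (Python) =====
-- def calculate(r, c):
--     start = 20151125
--     cr, cc = 1, 1
--     while True:
--         if cr == r and cc == c:
--             return start
--         if cr == 1:
--             cr = cc + 1
--             cc = 1
--         else:
--             cr -= 1
--             cc += 1
--         start *= 252533
--         start %= 33554393
-- ===== SOURCE B (Python) =====
-- def calculate(r, c):
--     # Closed form: the cell (r, c) is the idx-th element (0-based) of the
--     # diagonal enumeration, idx = T(r+c-2) + (c-1); the value is
--     # 20151125 * 252533^idx mod 33554393, computed by modular exponentiation.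
--     n = r + c - 1
--     idx = n * (n - 1) // 2 + (c - 1)
--     return 20151125 * pow(252533, idx, 33554393) % 33554393
-- ===== Notes on version B (the rewrite author's own statement) =====
-- stated objective: faster
-- what changed: Replaces the step-by-step diagonal walk (one modular multiplication per visited cell) with the closed-form 0-based index idx=(r+c-1)(r+c-2)/2+(c-1) and one modular exponentiation pow(252533, idx, 33554393).
import Mathlib
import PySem

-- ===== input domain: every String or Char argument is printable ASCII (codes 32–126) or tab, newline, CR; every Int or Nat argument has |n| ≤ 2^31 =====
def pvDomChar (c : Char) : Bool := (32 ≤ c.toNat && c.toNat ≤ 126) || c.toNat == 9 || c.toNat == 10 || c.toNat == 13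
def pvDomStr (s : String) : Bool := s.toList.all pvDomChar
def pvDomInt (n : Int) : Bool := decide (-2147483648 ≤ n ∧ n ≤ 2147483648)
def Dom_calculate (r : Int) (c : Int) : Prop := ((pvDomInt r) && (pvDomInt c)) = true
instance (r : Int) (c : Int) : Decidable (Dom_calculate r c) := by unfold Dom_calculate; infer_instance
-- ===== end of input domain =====

-- B replaces A's step-by-step diagonal walk with a closed-form index plus one modular
-- exponentiation (objective: faster, asymptotically).

-- ===== PORT A =====
-- A's 'while True' walk over the diagonals; the fuel only makes the loop total in Lean —
-- under Pre_calculate the target cell is reached strictly before the fuel runs out.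
def calcLoopA (r c : Int) : Nat → Int → Int → Int → Int
  | 0, start, _, _ => start
  | fuel + 1, start, cr, cc =>
    if cr = r ∧ cc = c then start
    else
      calcLoopA r c fuel (PySem.Int.mod (start * 252533) 33554393)
        (if cr = 1 then cc + 1 else cr - 1) (if cr = 1 then 1 else cc + 1)

def calculate (r : Int) (c : Int) : Int :=
  calcLoopA r c (((r + c).toNat) * ((r + c).toNat)) 20151125 1 1

-- ===== PORT B =====
def calculate_alt (r : Int) (c : Int) : Int :=
  let n := r + c - 1
  let idx := PySem.Int.floordiv (n * (n - 1)) 2 + (c - 1)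
  PySem.Int.mod (20151125 * PySem.Int.powMod 252533 idx.toNat 33554393) 33554393

-- ===== PRECONDITION & SPEC =====
-- A's loop enumerates exactly the cells with row ≥ 1 and column ≥ 1, so on any other
-- input the 'while True' loop never terminates (A diverges): exclude those inputs.
def Pre_calculate (r : Int) (c : Int) : Prop := 1 ≤ r ∧ 1 ≤ c
instance (r : Int) (c : Int) : Decidable (Pre_calculate r c) := by unfold Pre_calculate; infer_instance
def pvWitness_calculate : Int × Int := (3, 4)

def Spec_calculate (r : Int) (c : Int) (out : Int) : Prop := out = calculate_alt r c
instance (r : Int) (c : Int) (out : Int) : Decidable (Spec_calculate r c out) := by unfold Spec_calculate; infer_instance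

-- ===== CLAIM (what is proved, stated in full; the proofs are below) =====
def Claim_equal_calculate : Prop := ∀ (r : Int) (c : Int), Dom_calculate r c → Pre_calculate r c → Spec_calculate r c (calculate r c)

-- ===== LEMMAS AND PROOFS =====

-- triangular numbers, recursively (no division)
def tri : Nat → Nat
  | 0 => 0
  | n + 1 => tri n + n + 1

-- 0-based diagonal index of cell (row a, col b) (both 0-based)
def nidx (a b : Nat) : Nat := tri (a + b) + b

lemma two_mul_tri (n : Nat) : 2 * tri n = n * (n + 1) := by
  induction n with
  | zero => rfl
  | succ k ih => simp [tri]; ring_nf; ring_nf at ih; omega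

lemma tri_mono : ∀ {s s' : Nat}, s ≤ s' → tri s ≤ tri s' := by
  intro s s' h
  induction h with
  | refl => exact le_refl _
  | step _ ih => simp [tri]; omega

lemma nidx_inj {a b a' b' : Nat} (h : nidx a b = nidx a' b') : a = a' ∧ b = b' := by
  unfold nidx at h
  rcases Nat.lt_trichotomy (a + b) (a' + b') with hlt | heq | hgt
  · exfalso
    have h1 : tri (a + b + 1) = tri (a + b) + (a + b) + 1 := rfl
    have h2 : tri (a + b + 1) ≤ tri (a' + b') := tri_mono hlt
    omega
  · have : b = b' := by rw [heq] at h; omega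
    omega
  · exfalso
    have h1 : tri (a' + b' + 1) = tri (a' + b') + (a' + b') + 1 := rfl
    have h2 : tri (a' + b' + 1) ≤ tri (a + b) := tri_mono hgt
    omega

-- the step of A's walk increases nidx by exactly one
lemma nidx_step_zero (b : Nat) : nidx (b + 1) 0 = nidx 0 b + 1 := by
  simp [nidx, tri]
lemma nidx_step_succ (a b : Nat) : nidx a (b + 1) = nidx (a + 1) b + 1 := by
  unfold nidx
  have h : a + (b + 1) = a + 1 + b := by omega
  rw [h]
  omega

lemma mod_mod_mul (s t : Int) :
    PySem.Int.mod (PySem.Int.mod s 33554393 * t) 33554393 = PySem.Int.mod (s * t) 33554393 := by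
  simp only [PySem.Int.mod_eq_emod_of_pos (show (0:Int) < 33554393 by norm_num)]
  conv_lhs => rw [Int.mul_emod]
  conv_rhs => rw [Int.mul_emod]
  rw [Int.emod_emod_of_dvd _ (dvd_refl _)]

lemma mod_mul_mod (t s : Int) :
    PySem.Int.mod (t * PySem.Int.mod s 33554393) 33554393 = PySem.Int.mod (t * s) 33554393 := by
  simp only [PySem.Int.mod_eq_emod_of_pos (show (0:Int) < 33554393 by norm_num)]
  conv_lhs => rw [Int.mul_emod]
  conv_rhs => rw [Int.mul_emod]
  rw [Int.emod_emod_of_dvd _ (dvd_refl _)]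

-- main invariant of A's loop
lemma calcLoopA_eq (r c : Nat) : ∀ (d : Nat) (fuel : Nat) (a b : Nat) (s : Int),
    nidx r c = nidx a b + d → d < fuel →
    calcLoopA ((r : Int) + 1) ((c : Int) + 1) fuel s ((a : Int) + 1) ((b : Int) + 1)
      = if d = 0 then s else PySem.Int.mod (s * 252533 ^ d) 33554393 := by
  intro d
  induction d with
  | zero =>
    intro fuel a b s hidx hfuel
    obtain ⟨ha, hb⟩ := nidx_inj (by omega : nidx a b = nidx r c)
    subst ha; subst hb
    match fuel, hfuel with
    | fuel + 1, _ => simp [calcLoopA]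
  | succ d ih =>
    intro fuel a b s hidx hfuel
    match fuel, hfuel with
    | fuel + 1, _ =>
      have hne : ¬((a : Int) + 1 = (r : Int) + 1 ∧ (b : Int) + 1 = (c : Int) + 1) := by
        rintro ⟨h1, h2⟩
        have : a = r ∧ b = c := by constructor <;> omega
        rw [this.1, this.2] at hidx; omega
      rw [calcLoopA, if_neg hne]
      rcases Nat.eq_zero_or_pos a with ha | ha
      · subst ha
        have step : nidx r c = nidx (b + 1) 0 + d := by rw [nidx_step_zero]; omega
        have hrec := ih fuel (b + 1) 0 (PySem.Int.mod (s * 252533) 33554393) step (by omega)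
        have e1 : ((0:Nat):Int) + 1 = 1 := by norm_num
        have e2 : ((b:Int) + 1 + 1) = ((b + 1 : Nat) : Int) + 1 := by push_cast; ring
        rw [e1] at hrec
        rw [e1, if_pos rfl, if_pos rfl, e2, hrec]
        rcases Nat.eq_zero_or_pos d with hd | hd
        · subst hd; simp [pow_one]
        · rw [if_neg (by omega), if_neg (by omega), mod_mod_mul]
          ring_nf
      · have hcr : ¬((a : Int) + 1 = 1) := by omega
        obtain ⟨a', rfl⟩ : ∃ a', a = a' + 1 := ⟨a - 1, by omega⟩
        have step : nidx r c = nidx a' (b + 1) + d := by rw [nidx_step_succ]; omega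
        have hrec := ih fuel a' (b + 1) (PySem.Int.mod (s * 252533) 33554393) step (by omega)
        rw [if_neg hcr, if_neg hcr]
        have e1 : ((a' + 1 : Nat) : Int) + 1 - 1 = ((a' : Nat) : Int) + 1 := by push_cast; ring
        have e2 : ((b:Int) + 1 + 1) = ((b + 1 : Nat) : Int) + 1 := by push_cast; ring
        rw [e1, e2, hrec]
        rcases Nat.eq_zero_or_pos d with hd | hd
        · subst hd; simp [pow_one]
        · rw [if_neg (by omega), if_neg (by omega), mod_mod_mul]
          ring_nf

lemma tri_bound (s : Nat) : tri s + s < (s + 2) * (s + 2) := by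
  have := two_mul_tri s
  nlinarith

-- B's closed-form index equals nidx
lemma idx_eq (r c : Nat) :
    (PySem.Int.floordiv ((((r:Int)+1) + ((c:Int)+1) - 1) * ((((r:Int)+1) + ((c:Int)+1) - 1) - 1)) 2
      + (((c:Int)+1) - 1)).toNat = nidx r c := by
  have h1 : (((r:Int)+1) + ((c:Int)+1) - 1) * ((((r:Int)+1) + ((c:Int)+1) - 1) - 1)
      = (((r + c + 1) * (r + c) : Nat) : Int) := by push_cast; ring
  rw [h1]
  rw [show ((2:Int)) = ((2:Nat):Int) from rfl, PySem.Int.floordiv_natCast]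
  have h2 : (r + c + 1) * (r + c) / 2 = tri (r + c) := by
    have h3 : (r + c + 1) * (r + c) = 2 * tri (r + c) := by
      rw [two_mul_tri]; ring
    omega
  rw [h2]
  unfold nidx
  omega

-- ===== VERDICT (by name: the statement is the Claim_ definition above) =====
theorem calculate_spec : Claim_equal_calculate := by
  intro r c _ ⟨hr, hc⟩
  obtain ⟨a, rfl⟩ : ∃ a : Nat, r = (a : Int) + 1 := ⟨(r - 1).toNat, by omega⟩
  obtain ⟨b, rfl⟩ : ∃ b : Nat, c = (b : Int) + 1 := ⟨(c - 1).toNat, by omega⟩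
  unfold Spec_calculate calculate calculate_alt
  dsimp only
  set d := nidx a b with hd
  have hfuel : d < (((a:Int) + 1 + ((b:Int) + 1)).toNat) * (((a:Int) + 1 + ((b:Int) + 1)).toNat) := by
    have h1 : ((a:Int) + 1 + ((b:Int) + 1)).toNat = a + b + 2 := by omega
    rw [h1, hd]
    have := tri_bound (a + b)
    unfold nidx
    omega
  have hA := calcLoopA_eq a b d _ 0 0 20151125 (by simp [nidx, tri, hd]) hfuel
  simp only [Nat.cast_zero, zero_add] at hA
  rw [hA, idx_eq a b, ← hd]
  unfold PySem.Int.powMod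
  by_cases h0 : d = 0
  · rw [if_pos h0, h0]
    norm_num [PySem.Int.mod_eq_emod_of_pos (show (0:Int) < 33554393 by norm_num)]
  · rw [if_neg h0, mod_mul_mod]
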